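-- pv_equiv track=rewrite | github.com/keremkcl/Programlama-Lab1 | Untitled2-Copy1.py | my_frequency_with_list_of_tuples
-- ===== SOURCE A (Python) =====
-- def my_frequency_with_list_of_tuples(list_1):
--     frequency_list=[]
--     for i in range(len(list_1)):
--         s=False
--         for j in range(len(frequency_list)):
--             if (list_1[i])==frequency_list[j][0]:
--                 frequency_list[j][1]=frequency_list[j][1]+1
--                 s=True
--         if(s==False):
--             frequency_list.append([list_1[i],1])
--     return  frequency_list
-- ===== SOURCE B (Python) =====
-- def my_frequency_with_list_of_tuples(list_1):
--     table = {}
--     for x in list_1: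
--         table[x] = table.get(x, 0) + 1
--     seen = set()
--     result = []
--     for x in list_1:
--         if x not in seen:
--             seen.add(x)
--             result.append([x, table[x]])
--     return result
-- ===== Notes on version B (the rewrite author's own statement) =====
-- stated objective: faster
-- what changed: Replaces A's nested scan (for each element, rescan the growing frequency list to increment a match) with a build-table-then-emit decomposition: one pass builds a dict of counts, a second pass with a seen-set emits [value, count] pairs in first-appearance order.
import Mathlib
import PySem

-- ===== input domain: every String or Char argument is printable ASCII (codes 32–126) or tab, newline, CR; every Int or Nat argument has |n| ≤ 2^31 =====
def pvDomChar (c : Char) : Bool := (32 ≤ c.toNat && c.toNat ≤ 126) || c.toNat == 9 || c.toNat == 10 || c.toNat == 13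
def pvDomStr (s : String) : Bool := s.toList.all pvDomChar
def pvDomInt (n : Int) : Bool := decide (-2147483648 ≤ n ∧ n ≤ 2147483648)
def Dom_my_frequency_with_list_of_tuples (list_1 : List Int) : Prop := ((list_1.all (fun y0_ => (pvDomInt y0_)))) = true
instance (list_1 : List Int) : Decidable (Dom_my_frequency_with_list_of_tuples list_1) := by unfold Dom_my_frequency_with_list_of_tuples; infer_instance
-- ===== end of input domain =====

-- B replaces A's nested rescans of the growing frequency list with one counting pass
-- (dict) plus one emit pass with a seen-set; objective: faster (measured).

-- ===== PORT A =====
-- A's outer loop carries frequency_list; the inner index loop over frequency_list both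
-- increments every matching entry (a map) and records whether any matched (an any).
def my_frequency_with_list_of_tuples (list_1 : List Int) : List (List Int) :=
  list_1.foldl (fun fl x =>
    let fl' := fl.map (fun e =>
      if PySem.List.pyGetD e 0 0 == x then
        PySem.List.pySetD e 1 (PySem.List.pyGetD e 1 0 + 1)
      else e)
    let s := fl.any (fun e => PySem.List.pyGetD e 0 0 == x)
    if s then fl' else fl' ++ [[x, 1]]) []

-- ===== PORT B =====
def my_frequency_with_list_of_tuples_alt (list_1 : List Int) : List (List Int) :=
  let table : PySem.Dict Int Int :=
    list_1.foldl (fun d x => d.insert x (d.getD x 0 + 1)) PySem.Dict.empty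
  (list_1.foldl (fun st x =>
      if PySem.Set.contains st.1 x then st
      else (PySem.Set.add st.1 x, st.2 ++ [[x, table.getD x 0]]))
    ((PySem.Set.empty : PySem.Set Int), ([] : List (List Int)))).2

-- ===== PRECONDITION & SPEC =====
def Spec_my_frequency_with_list_of_tuples (list_1 : List Int) (out : List (List Int)) : Prop := out = my_frequency_with_list_of_tuples_alt list_1
instance (list_1 : List Int) (out : List (List Int)) : Decidable (Spec_my_frequency_with_list_of_tuples list_1 out) := by unfold Spec_my_frequency_with_list_of_tuples; infer_instance

-- ===== CLAIM (what is proved, stated in full; the proofs are below) =====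
def Claim_equal_my_frequency_with_list_of_tuples : Prop := ∀ (list_1 : List Int), Dom_my_frequency_with_list_of_tuples list_1 → Spec_my_frequency_with_list_of_tuples list_1 (my_frequency_with_list_of_tuples list_1)

-- ===== LEMMAS AND PROOFS =====

-- the common normal form: first occurrences in order, each paired with its total count
def pvFreqSpec (l : List Int) : List (List Int) :=
  (PySem.List.dedup l).map (fun v => [v, (l.count v : Int)])

lemma pvDedup_append_singleton (l : List Int) (x : Int) :
    PySem.List.dedup (l ++ [x]) =
      if x ∈ l then PySem.List.dedup l else PySem.List.dedup l ++ [x] := by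
  simp only [PySem.List.dedup_eq_ofList, PySem.Set.ofList_eq_foldl, List.foldl_append,
    List.foldl_cons, List.foldl_nil]
  rw [← PySem.Set.ofList_eq_foldl]
  by_cases h : x ∈ l
  · simp [PySem.Set.add, PySem.Set.contains, h, PySem.Set.mem_ofList]
  · simp [PySem.Set.add, PySem.Set.contains, h, PySem.Set.mem_ofList]

lemma pvA_eq_spec (l : List Int) :
    my_frequency_with_list_of_tuples l = pvFreqSpec l := by
  induction l using List.reverseRecOn with
  | nil => rfl
  | append_singleton l x ih =>
    unfold my_frequency_with_list_of_tuples at *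
    rw [List.foldl_append, List.foldl_cons, List.foldl_nil, ih]
    unfold pvFreqSpec
    rw [pvDedup_append_singleton]
    have hany : ((PySem.List.dedup l).map (fun v => [v, (l.count v : Int)])).any
        (fun e => PySem.List.pyGetD e 0 0 == x) = decide (x ∈ l) := by
      rw [List.any_map]
      simp only [Function.comp_def, PySem.List.pyGetD_zero_cons, PySem.List.dedup_eq_ofList]
      by_cases hx : x ∈ l
      · simp only [hx, decide_true, List.any_eq_true, beq_iff_eq]
        exact ⟨x, by simp [PySem.Set.mem_ofList, hx], rfl⟩
      · have hall : ∀ v ∈ PySem.Set.ofList l, (v == x) = false := by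
          intro v hv
          have hvl : v ∈ l := by simpa [PySem.Set.mem_ofList] using hv
          simp only [beq_eq_false_iff_ne, ne_eq]
          exact fun hvx => hx (hvx ▸ hvl)
        rw [decide_eq_false hx, List.any_eq_false]
        intro v hv
        simp [hall v hv]
    have hmap : ((PySem.List.dedup l).map (fun v => [v, (l.count v : Int)])).map
        (fun e => if PySem.List.pyGetD e 0 0 == x then
            PySem.List.pySetD e 1 (PySem.List.pyGetD e 1 0 + 1) else e) =
        (PySem.List.dedup l).map (fun v => [v, ((l ++ [x]).count v : Int)]) := by
      rw [List.map_map]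
      apply List.map_congr_left
      intro v _
      simp only [Function.comp_def, PySem.List.pyGetD_zero_cons]
      by_cases hv : v = x
      · subst hv
        have h1 : PySem.List.pyGetD [v, (l.count v : Int)] 1 0 = (l.count v : Int) := rfl
        have h2 : ∀ z : Int, PySem.List.pySetD [v, (l.count v : Int)] 1 z = [v, z] :=
          fun z => rfl
        simp only [beq_self_eq_true, if_true, h1, h2, List.count_append,
          List.count_singleton, beq_self_eq_true]
        push_cast
        ring_nf
      · have hxv : x ≠ v := Ne.symm hv
        simp [hv, hxv, List.count_append]
    simp only [hany, hmap]
    by_cases h : x ∈ l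
    · simp [h]
    · have hnot : ∀ v ∈ PySem.List.dedup l, (l ++ [x]).count v = l.count v := by
        intro v hv
        rw [PySem.List.mem_dedup] at hv
        have hxv : x ≠ v := fun hvx => h (hvx ▸ hv)
        simp [List.count_append, hxv]
      have h0 : l.count x = 0 := List.count_eq_zero.mpr h
      have hmap2 : (PySem.List.dedup l).map (fun v => [v, ((l ++ [x]).count v : Int)]) =
          (PySem.List.dedup l).map (fun v => [v, (l.count v : Int)]) :=
        List.map_congr_left fun v hv => by rw [hnot v hv]
      have hb : ¬(decide (x ∈ l) = true) := by simp [h]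
      rw [if_neg hb, if_neg h, hmap2, List.map_append]
      congr 1
      · exact (List.map_congr_left fun v hv => by rw [hnot v hv]).symm
      · simp [List.count_append, h0]

-- emit pass with any fixed table d
lemma pvEmit_eq (d : PySem.Dict Int Int) (l : List Int) :
    l.foldl (fun st x =>
        if PySem.Set.contains st.1 x then st
        else (PySem.Set.add st.1 x, st.2 ++ [[x, d.getD x 0]]))
      ((PySem.Set.empty : PySem.Set Int), ([] : List (List Int))) =
    (PySem.Set.ofList l, (PySem.List.dedup l).map (fun v => [v, d.getD v 0])) := by
  induction l using List.reverseRecOn with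
  | nil => rfl
  | append_singleton l x ih =>
    rw [List.foldl_append, List.foldl_cons, List.foldl_nil, ih]
    have hofl : PySem.Set.ofList (l ++ [x]) = PySem.Set.add (PySem.Set.ofList l) x := by
      simp [PySem.Set.ofList_eq_foldl]
    rw [pvDedup_append_singleton, hofl]
    by_cases h : x ∈ l
    · have hc : PySem.Set.contains (PySem.Set.ofList l) x = true := by
        simp [PySem.Set.contains, PySem.Set.mem_ofList, h]
      simp [PySem.Set.add, h]
    · have hc : PySem.Set.contains (PySem.Set.ofList l) x = false := by
        simp [PySem.Set.contains, PySem.Set.mem_ofList, h]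
      simp [h, PySem.Set.add]

lemma pvB_eq_spec (l : List Int) :
    my_frequency_with_list_of_tuples_alt l = pvFreqSpec l := by
  show (l.foldl (fun st x =>
      if PySem.Set.contains st.1 x then st
      else (PySem.Set.add st.1 x, st.2 ++
        [[x, (l.foldl (fun d y => d.insert y (d.getD y 0 + 1)) PySem.Dict.empty).getD x 0]]))
    ((PySem.Set.empty : PySem.Set Int), ([] : List (List Int)))).2 = pvFreqSpec l
  rw [PySem.Dict.foldl_insert_getD_add_one_eq_counter, pvEmit_eq (PySem.Dict.counter l) l]
  unfold pvFreqSpec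
  apply List.map_congr_left
  intro v _
  rw [PySem.Dict.getD_counter]

-- ===== VERDICT (by name: the statement is the Claim_ definition above) =====
theorem my_frequency_with_list_of_tuples_spec : Claim_equal_my_frequency_with_list_of_tuples := by
  intro l _
  unfold Spec_my_frequency_with_list_of_tuples
  rw [pvA_eq_spec, pvB_eq_spec]
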